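-- pv_equiv track=rewrite | github.com/hungqng/Hackerrank-1-Week-Preparation | Flipping the Matrix.py | flippingMatrix
-- ===== SOURCE A (Python) =====
-- def flippingMatrix(matrix):
--     # Write your code here
--     n = int(len(matrix) /  2)
--     maxValue = 0
--     total = 0
--
--     for r in range(n):
--         for c in range(n):
--             maxValue += max(max(matrix[r][c],matrix[r][2*n-c-1]),
--                             max(matrix[2*n-r-1][c],matrix[2*n-r-1][2*n-c-1]))
--     return maxValue
-- ===== SOURCE B (Python) =====
-- def flippingMatrix(matrix):
--     # Group-and-aggregate: one pass over every cell of the (truncated) matrix,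
--     # keyed by its mirror-orbit representative; a dict keeps the running max
--     # per orbit, and the answer is the sum of the per-orbit maxima.
--     n = len(matrix) // 2
--     best = {}
--     for r in range(2 * n):
--         for c in range(2 * n):
--             key = (min(r, 2 * n - 1 - r), min(c, 2 * n - 1 - c))
--             v = matrix[r][c]
--             best[key] = max(best.get(key, v), v)
--     return sum(best.values())
-- ===== Notes on version B (the rewrite author's own statement) =====
-- stated objective: alternative
-- what changed: B replaces A's quadrant-indexed 4-way-max scan with a group-and-aggregate pass over every cell of the matrix: each cell is mapped to its mirror-orbit key and a dict keeps the running maximum per orbit, the result being the sum of the dict's values.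
import Mathlib
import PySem

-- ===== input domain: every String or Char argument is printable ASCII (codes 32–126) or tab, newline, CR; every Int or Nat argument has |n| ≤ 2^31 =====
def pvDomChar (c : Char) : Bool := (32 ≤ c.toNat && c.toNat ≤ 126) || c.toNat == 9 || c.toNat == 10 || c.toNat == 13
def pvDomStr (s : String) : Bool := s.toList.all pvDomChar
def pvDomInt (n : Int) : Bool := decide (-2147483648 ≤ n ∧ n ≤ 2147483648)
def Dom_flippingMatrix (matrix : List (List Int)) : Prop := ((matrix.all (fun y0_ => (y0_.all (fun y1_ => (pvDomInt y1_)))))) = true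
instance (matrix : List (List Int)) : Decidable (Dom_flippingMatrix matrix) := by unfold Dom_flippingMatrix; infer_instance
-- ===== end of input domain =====

-- B replaces A's quadrant-indexed 4-way-max scan by a group-and-aggregate pass over the
-- whole matrix keyed by mirror-orbit, as a dict of running maxima (objective: alternative).

-- ===== PORT A =====
-- literal transliteration of A: quadrant scan, 4-way max of the mirror images of (r, c)
def flippingMatrix (matrix : List (List Int)) : Int :=
  let n : Int := PySem.Int.floordiv (matrix.length : Int) 2
  (PySem.List.pyRange 0 n).foldl (fun maxValue r =>
    (PySem.List.pyRange 0 n).foldl (fun mv c =>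
      mv + max (max (PySem.List.pyGetD (PySem.List.pyGetD matrix r []) c 0)
                    (PySem.List.pyGetD (PySem.List.pyGetD matrix r []) (2*n - c - 1) 0))
               (max (PySem.List.pyGetD (PySem.List.pyGetD matrix (2*n - r - 1) []) c 0)
                    (PySem.List.pyGetD (PySem.List.pyGetD matrix (2*n - r - 1) []) (2*n - c - 1) 0)))
      maxValue) 0

-- ===== PORT B =====
-- literal transliteration of B: one pass over all cells of the 2n×2n matrix; a dict maps
-- each mirror-orbit key (min(r,2n-1-r), min(c,2n-1-c)) to the running max of its cells
-- (best[key] = max(best.get(key, v), v) is Dict.insert of the max over Dict.getD);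
-- the result is the sum of the dict's values.
def flippingMatrix_alt (matrix : List (List Int)) : Int :=
  let n : Int := PySem.Int.floordiv (matrix.length : Int) 2
  let best : PySem.Dict (Int × Int) Int :=
    (PySem.List.pyRange 0 (2*n)).foldl (fun best r =>
      (PySem.List.pyRange 0 (2*n)).foldl (fun best c =>
        let key : Int × Int := (min r (2*n - 1 - r), min c (2*n - 1 - c))
        let v := PySem.List.pyGetD (PySem.List.pyGetD matrix r []) c 0
        best.insert key (max (best.getD key v) v)) best)
      PySem.Dict.empty
  best.values.sum

-- ===== PRECONDITION & SPEC =====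
-- Pre_ excludes exactly the inputs on which both Pythons raise IndexError: some row among the
-- first 2*(len//2) rows is shorter than 2*(len//2) (every such row is indexed at column 2n-1).
def Pre_flippingMatrix (matrix : List (List Int)) : Prop :=
  ∀ row ∈ matrix.take (2 * (matrix.length / 2)), 2 * (matrix.length / 2) ≤ row.length
instance (matrix : List (List Int)) : Decidable (Pre_flippingMatrix matrix) := by
  unfold Pre_flippingMatrix; infer_instance
def pvWitness_flippingMatrix : List (List Int) := [[1, 2], [3, 4]]

def Spec_flippingMatrix (matrix : List (List Int)) (out : Int) : Prop := out = flippingMatrix_alt matrix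
instance (matrix : List (List Int)) (out : Int) : Decidable (Spec_flippingMatrix matrix out) := by unfold Spec_flippingMatrix; infer_instance

-- ===== CLAIM (what is proved, stated in full; the proofs are below) =====
def Claim_equal_flippingMatrix : Prop := ∀ (matrix : List (List Int)), Dom_flippingMatrix matrix → Pre_flippingMatrix matrix → Spec_flippingMatrix matrix (flippingMatrix matrix)

-- ===== LEMMAS AND PROOFS =====

-- the common value both ports are reduced to: sum over the quadrant of the 4-way max
def pvCell (matrix : List (List Int)) (i j : Nat) : Int := (matrix.getD i []).getD j 0

def pvQuadSum (matrix : List (List Int)) (m : Nat) : Int :=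
  ((List.range m).map (fun r =>
    ((List.range m).map (fun c =>
      max (max (pvCell matrix r c) (pvCell matrix r (2*m-1-c)))
          (max (pvCell matrix (2*m-1-r) c) (pvCell matrix (2*m-1-r) (2*m-1-c))))).sum)).sum

-- B-side abstractions on Nat coordinates (m = half size)
def pvKey (m : Nat) (p : Nat × Nat) : Int × Int :=
  (min (p.1 : Int) (2*(m:Int) - 1 - p.1), min (p.2 : Int) (2*(m:Int) - 1 - p.2))

def pvVal (matrix : List (List Int)) (p : Nat × Nat) : Int := pvCell matrix p.1 p.2

def pvCells (m : Nat) : List (Nat × Nat) :=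
  (List.range (2*m)).flatMap (fun r => (List.range (2*m)).map (fun c => (r, c)))

def pvStep (matrix : List (List Int)) (m : Nat)
    (d : PySem.Dict (Int × Int) Int) (p : Nat × Nat) : PySem.Dict (Int × Int) Int :=
  d.insert (pvKey m p) (max (d.getD (pvKey m p) (pvVal matrix p)) (pvVal matrix p))

def pvQuadKeys (m : Nat) : List (Int × Int) :=
  (List.range m).flatMap (fun (i : Nat) => (List.range m).map (fun (j : Nat) => ((i:Int), (j:Int))))

theorem A_eq (matrix : List (List Int)) :
    flippingMatrix matrix = pvQuadSum matrix (matrix.length / 2) := by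
  have hn : PySem.Int.floordiv (matrix.length : Int) 2 = ((matrix.length / 2 : Nat) : Int) := by
    exact_mod_cast PySem.Int.floordiv_natCast matrix.length 2
  set m := matrix.length / 2 with hm
  unfold flippingMatrix pvQuadSum
  simp only [hn, PySem.List.pyRange_zero_natCast, List.foldl_map, PySem.List.foldl_add, zero_add]
  congr 1
  apply List.map_congr_left
  intro r hr
  rw [List.mem_range] at hr
  congr 1
  apply List.map_congr_left
  intro c hc
  rw [List.mem_range] at hc
  rw [show 2*((m : Nat) : Int) - (c : Int) - 1 = ((2*m-1-c : Nat) : Int) by omega,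
      show 2*((m : Nat) : Int) - (r : Int) - 1 = ((2*m-1-r : Nat) : Int) by omega]
  simp only [PySem.List.pyGetD_natCast, pvCell]

theorem B_fold (matrix : List (List Int)) :
    flippingMatrix_alt matrix
      = (((pvCells (matrix.length / 2)).foldl
            (pvStep matrix (matrix.length / 2)) PySem.Dict.empty).values).sum := by
  have hn : PySem.Int.floordiv (matrix.length : Int) 2 = ((matrix.length / 2 : Nat) : Int) := by
    exact_mod_cast PySem.Int.floordiv_natCast matrix.length 2
  unfold flippingMatrix_alt pvCells
  rw [List.foldl_flatMap]
  simp only [hn,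
    show (2 * ((matrix.length / 2 : Nat) : Int)) = ((2 * (matrix.length / 2) : Nat) : Int) by
      push_cast; ring,
    PySem.List.pyRange_zero_natCast, List.foldl_map, PySem.List.pyGetD_natCast]
  unfold pvStep pvKey pvVal pvCell
  rfl

-- getD of the running-max fold: the max of the matching values (seeded by the dict)
theorem getD_fold_max (matrix : List (List Int)) (m : Nat) (k : Int × Int) :
    ∀ (l : List (Nat × Nat)) (d : PySem.Dict (Int × Int) Int) (d0 : Int),
    (l.foldl (pvStep matrix m) d).getD k d0 =
      if d.contains k then
        ((l.filter (fun p => pvKey m p = k)).map (pvVal matrix)).foldl max (d.getD k d0)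
      else
        match (l.filter (fun p => pvKey m p = k)).map (pvVal matrix) with
        | [] => d0
        | v :: vs => vs.foldl max v := by
  intro l
  induction l with
  | nil =>
    intro d d0
    simp only [List.foldl_nil, List.filter_nil, List.map_nil]
    split_ifs with hc
    · rfl
    · exact PySem.Dict.getD_of_not_contains d d0 (by simpa using hc)
  | cons p t ih =>
    intro d d0
    simp only [List.foldl_cons, List.filter_cons]
    by_cases hkey : pvKey m p = k
    · simp only [hkey, decide_true, if_true, List.map_cons]
      rw [ih (pvStep matrix m d p) d0]
      have hcontains : (pvStep matrix m d p).contains k = true := by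
        unfold pvStep
        rw [PySem.Dict.contains_insert]
        simp [hkey]
      rw [if_pos hcontains]
      have hgetD : (pvStep matrix m d p).getD k d0
          = max (d.getD k (pvVal matrix p)) (pvVal matrix p) := by
        unfold pvStep
        rw [PySem.Dict.getD_insert, if_pos hkey.symm, hkey]
      rw [hgetD]
      by_cases hc : d.contains k = true
      · rw [if_pos hc]
        obtain ⟨v, hv⟩ : ∃ v, d.get? k = some v := by
          have := PySem.Dict.contains_eq_isSome_get? (d := d) (k := k)
          rw [hc] at this
          exact Option.isSome_iff_exists.mp this.symm
        rw [PySem.Dict.getD_eq_get?_getD, PySem.Dict.getD_eq_get?_getD, hv, List.foldl_cons]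
        rfl
      · rw [if_neg hc]
        rw [PySem.Dict.getD_of_not_contains d (pvVal matrix p) (by simpa using hc), max_self]
    · simp only [hkey, decide_false]
      rw [ih (pvStep matrix m d p) d0]
      have hkey' : k ≠ pvKey m p := fun h => hkey h.symm
      have hcontains : (pvStep matrix m d p).contains k = d.contains k := by
        unfold pvStep
        rw [PySem.Dict.contains_insert]
        simp [hkey']
      have hgetD : (pvStep matrix m d p).getD k d0 = d.getD k d0 := by
        unfold pvStep
        rw [PySem.Dict.getD_insert, if_neg hkey']
      rw [hcontains, hgetD]
      rfl


theorem keys_fold (matrix : List (List Int)) (m : Nat) :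
    ((pvCells m).foldl (pvStep matrix m) PySem.Dict.empty).keys
      = PySem.Set.ofList ((pvCells m).map (pvKey m)) := by
  unfold pvStep
  rw [PySem.Dict.keys_foldl_insert_key (pvCells m) (pvKey m)
      (fun d p => max (d.getD (pvKey m p) (pvVal matrix p)) (pvVal matrix p)) PySem.Dict.empty]
  simp [PySem.Set.update_nil_left]

theorem nodup_keys_fold (matrix : List (List Int)) (m : Nat) :
    ((pvCells m).foldl (pvStep matrix m) PySem.Dict.empty).keys.Nodup := by
  unfold pvStep
  exact PySem.Dict.nodup_keys_foldl_insert_key (pvCells m) (pvKey m)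
      (fun d p => max (d.getD (pvKey m p) (pvVal matrix p)) (pvVal matrix p)) PySem.Dict.empty
      PySem.Dict.nodup_keys_empty

-- Set.update is a no-op on elements already present
theorem update_self_of_subset {α : Type} [BEq α] [LawfulBEq α]
    (s : PySem.Set α) (xs : List α) (h : ∀ x ∈ xs, x ∈ s) : s.update xs = s := by
  rw [PySem.Set.update_eq_append_filter]
  have hnil : (PySem.Set.ofList xs).filter (fun y => !s.contains y) = [] := by
    rw [List.filter_eq_nil_iff]
    intro a ha
    have hc : s.contains a = true :=
      (PySem.Set.contains_iff s a).2 (h a ((PySem.Set.mem_ofList xs a).1 ha))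
    rw [hc]; simp
  rw [hnil, List.append_nil]

theorem rowKeysLow (m r : Nat) (hr : r < m) :
    (List.range (2*m)).map (fun c => pvKey m (r, c))
      = ((List.range m).map (fun (j : Nat) => ((r:Int), (j:Int))))
        ++ ((List.range m).map (fun (j : Nat) => ((r:Int), ((m-1-j : Nat):Int)))) := by
  rw [two_mul, List.range_add, List.map_append, List.map_map]
  congr 1
  · apply List.map_congr_left
    intro j hj
    rw [List.mem_range] at hj
    simp only [pvKey, Prod.mk.injEq]
    constructor <;> omega
  · apply List.map_congr_left
    intro j hj
    rw [List.mem_range] at hj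
    simp only [Function.comp_apply, pvKey, Prod.mk.injEq]
    constructor <;> omega

theorem ofListRowsLow (m : Nat) : ∀ r, r ≤ m →
    PySem.Set.ofList ((List.range r).flatMap (fun r' => (List.range (2*m)).map (fun c => pvKey m (r', c))))
      = (List.range r).flatMap (fun (i : Nat) => (List.range m).map (fun (j : Nat) => ((i:Int), (j:Int)))) := by
  intro r
  induction r with
  | zero => intro _; simp
  | succ r ih =>
    intro hr
    rw [List.range_succ, List.flatMap_append, List.flatMap_append,
        PySem.Set.ofList_append, ih (by omega)]
    simp only [List.flatMap_cons, List.flatMap_nil, List.append_nil]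
    rw [rowKeysLow m r (by omega), PySem.Set.update_append]
    have h1 : PySem.Set.update
        ((List.range r).flatMap (fun (i : Nat) => (List.range m).map (fun (j : Nat) => ((i:Int), (j:Int)))))
        ((List.range m).map (fun (j : Nat) => ((r:Int), (j:Int))))
        = ((List.range r).flatMap (fun (i : Nat) => (List.range m).map (fun (j : Nat) => ((i:Int), (j:Int)))))
          ++ ((List.range m).map (fun (j : Nat) => ((r:Int), (j:Int)))) := by
      apply PySem.Set.update_eq_append_of_disjoint
      · refine List.Nodup.map ?_ List.nodup_range
        intro a b hab
        simp only [Prod.mk.injEq] at hab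
        exact_mod_cast hab.2
      · intro x hx hmem
        simp only [List.mem_map, List.mem_range] at hx
        obtain ⟨j, hj, rfl⟩ := hx
        simp only [List.mem_flatMap, List.mem_map, List.mem_range] at hmem
        obtain ⟨i, hi, j', hj', heq⟩ := hmem
        simp only [Prod.mk.injEq] at heq
        have : i = r := by exact_mod_cast heq.1
        omega
    rw [h1]
    rw [update_self_of_subset _ _
        (by
          intro x hx
          simp only [List.mem_map, List.mem_range] at hx
          obtain ⟨j, hj, rfl⟩ := hx
          refine List.mem_append_right _ ?_
          simp only [List.mem_map, List.mem_range]
          exact ⟨m-1-j, by omega, rfl⟩)]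

theorem pvKey_mem (m r c : Nat) (hr : r < 2*m) (hc : c < 2*m) :
    pvKey m (r, c) ∈ pvQuadKeys m := by
  have hk : pvKey m (r, c)
      = (((min r (2*m-1-r) : Nat) : Int), ((min c (2*m-1-c) : Nat) : Int)) := by
    simp only [pvKey, Prod.mk.injEq]
    constructor <;> (push_cast; omega)
  rw [hk]
  unfold pvQuadKeys
  simp only [List.mem_flatMap, List.mem_map, List.mem_range]
  exact ⟨min r (2*m-1-r), by omega, min c (2*m-1-c), by omega, rfl⟩

theorem keysEq (m : Nat) :
    PySem.Set.ofList ((pvCells m).map (pvKey m)) = pvQuadKeys m := by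
  unfold pvCells
  rw [List.map_flatMap]
  simp only [List.map_map, Function.comp_def]
  set f : Nat → List (Int × Int) := fun r => (List.range (2*m)).map (fun c => pvKey m (r, c)) with hf
  have horiz : List.range (2*m) = List.range m ++ (List.range m).map (fun x => m + x) := by
    rw [two_mul, List.range_add]
  have h1 : PySem.Set.ofList ((List.range m).flatMap f) = pvQuadKeys m := by
    rw [hf]; exact ofListRowsLow m m le_rfl
  calc PySem.Set.ofList ((List.range (2*m)).flatMap f)
      = PySem.Set.ofList ((List.range m).flatMap f
          ++ ((List.range m).map (fun x => m + x)).flatMap f) := by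
        rw [horiz, List.flatMap_append]
    _ = (PySem.Set.ofList ((List.range m).flatMap f)).update
          (((List.range m).map (fun x => m + x)).flatMap f) := PySem.Set.ofList_append _ _
    _ = pvQuadKeys m := by
        rw [h1]
        apply update_self_of_subset
        intro x hx
        simp only [hf, List.mem_flatMap, List.mem_map, List.mem_range] at hx
        obtain ⟨r, ⟨r', hr', rfl⟩, hx⟩ := hx
        obtain ⟨c, hc, rfl⟩ := hx
        exact pvKey_mem m (m + r') c (by omega) (by omega)

theorem flatMap_range_two {α : Type} (g : Nat → List α) (a b : Nat) (hab : a < b)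
    (hz : ∀ r, r ≠ a → r ≠ b → g r = []) :
    ∀ N, (List.range N).flatMap g
      = (if a < N then g a else []) ++ (if b < N then g b else []) := by
  intro N
  induction N with
  | zero => simp
  | succ N ih =>
    rw [List.range_succ, List.flatMap_append, ih]
    simp only [List.flatMap_cons, List.flatMap_nil, List.append_nil]
    by_cases hNa : N = a
    · subst hNa
      rw [if_neg (by omega), if_neg (by omega), if_pos (by omega), if_neg (by omega)]
      simp
    · by_cases hNb : N = b
      · subst hNb
        rw [if_pos (by omega), if_neg (by omega), if_pos (by omega), if_pos (by omega)]
        simp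
      · simp [hz N hNa hNb, show (a < N + 1) ↔ a < N from by omega,
             show (b < N + 1) ↔ b < N from by omega]

theorem filter_range_two (a b : Nat) (hab : a < b) :
    ∀ N, (List.range N).filter (fun c => decide (c = a ∨ c = b))
      = (if a < N then [a] else []) ++ (if b < N then [b] else []) := by
  intro N
  induction N with
  | zero => simp
  | succ N ih =>
    rw [List.range_succ, List.filter_append, ih]
    by_cases hNa : N = a
    · subst hNa
      rw [if_neg (by omega), if_neg (by omega), if_pos (by omega), if_neg (by omega)]
      simp
    · by_cases hNb : N = b
      · subst hNb
        rw [if_pos (by omega), if_neg (by omega), if_pos (by omega), if_pos (by omega)]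
        simp
      · have : (List.filter (fun c => decide (c = a ∨ c = b)) [N]) = [] := by
          simp; omega
        rw [this]
        simp [show (a < N + 1) ↔ a < N from by omega,
              show (b < N + 1) ↔ b < N from by omega]

theorem cellsFilter (m i j : Nat) (hi : i < m) (hj : j < m) :
    (pvCells m).filter (fun p => pvKey m p = ((i:Int), (j:Int)))
      = [(i, j), (i, 2*m-1-j), (2*m-1-i, j), (2*m-1-i, 2*m-1-j)] := by
  unfold pvCells
  rw [List.filter_flatMap]
  have hlive : ∀ r : Nat, (min (r:Int) (2*(m:Int)-1-r) = (i:Int)) → (r = i ∨ r = 2*m-1-i) := by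
    intro r h; omega
  have hrow : ∀ r : Nat, min (r:Int) (2*(m:Int)-1-r) = (i:Int) →
      ((List.range (2*m)).map (fun c => ((r : Nat), c))).filter
          (fun p => pvKey m p = ((i:Int), (j:Int)))
        = [(r, j), (r, 2*m-1-j)] := by
    intro r hr
    rw [List.filter_map]
    rw [List.filter_congr (q := fun c => decide (c = j ∨ c = 2*m-1-j))
        (by
          intro c hc
          rw [List.mem_range] at hc
          simp only [Function.comp_apply, pvKey, Prod.mk.injEq, hr]
          rw [decide_eq_decide]
          simp only [true_and]
          omega)]
    rw [filter_range_two j (2*m-1-j) (by omega) (2*m)]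
    rw [if_pos (by omega), if_pos (by omega)]
    rfl
  rw [flatMap_range_two _ i (2*m-1-i) (by omega)
      (by
        intro r hra hrb
        rw [List.filter_map, List.filter_eq_nil_iff.mpr ?_, List.map_nil]
        intro c hc
        simp only [Function.comp_apply, pvKey, Prod.mk.injEq, decide_eq_true_eq, not_and]
        intro h1
        exfalso
        rcases hlive r h1 with h | h <;> omega) (2*m)]
  rw [if_pos (by omega), if_pos (by omega)]
  rw [hrow i (by omega), hrow (2*m-1-i) (by omega)]
  rfl

theorem B_eq (matrix : List (List Int)) :
    flippingMatrix_alt matrix = pvQuadSum matrix (matrix.length / 2) := by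
  set m := matrix.length / 2 with hm
  rw [B_fold, hm]
  rw [PySem.Dict.values_eq_map_keys _ (nodup_keys_fold matrix m) 0]
  rw [keys_fold, keysEq]
  unfold pvQuadKeys pvQuadSum
  rw [List.map_flatMap, List.flatMap, List.sum_flatten, List.map_map]
  congr 1
  apply List.map_congr_left
  intro i hi
  rw [List.mem_range] at hi
  simp only [Function.comp_apply, List.map_map]
  congr 1
  apply List.map_congr_left
  intro j hj
  rw [List.mem_range] at hj
  simp only [Function.comp_apply]
  rw [getD_fold_max matrix m ((i:Int), (j:Int)) (pvCells m) PySem.Dict.empty 0]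
  rw [if_neg (by simp [PySem.Dict.contains_empty])]
  rw [cellsFilter m i j hi hj]
  simp only [List.map_cons, List.map_nil, List.foldl_cons, List.foldl_nil]
  show ((pvVal matrix (i, j) ⊔ pvVal matrix (i, 2*m-1-j)) ⊔ pvVal matrix (2*m-1-i, j))
      ⊔ pvVal matrix (2*m-1-i, 2*m-1-j) = _
  rw [max_assoc (pvVal matrix (i, j) ⊔ pvVal matrix (i, 2*m-1-j))]
  rfl

-- ===== VERDICT (by name: the statement is the Claim_ definition above) =====
theorem flippingMatrix_spec : Claim_equal_flippingMatrix := by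
  intro matrix _ _
  unfold Spec_flippingMatrix
  rw [A_eq matrix, B_eq matrix]
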